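-- pv_equiv track=rewrite | github.com/pf981/dimity-jones-solutions | solutions/87.py | pour
-- ===== SOURCE A (Python) =====
-- def pour(cipher: str):
--     highest = 0
--     result = {}
--     for ch in cipher:
--         r = highest - 1
--         c = 0
--
--         while True:
--             assert (r, c) not in result
--
--             # Floor
--             if r == 0:
--                 break
--
--             # Down
--             if (r + 1, c) not in result:
--                 r += 1
--                 continue
--
--             # Left
--             if (r + 1, c - 1) not in result:
--                 r += 1
--                 c -= 1
--                 continue
--
--             # Right
--             if (r + 1, c + 1) not in result:
--                 r += 1
--                 c += 1
--                 continue
--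
--             # Settle
--             break
--
--         highest = min(highest, r)
--         result[(r, c)] = ch
--
--     return "".join(result[pos] for pos in sorted(result))
-- ===== SOURCE B (Python) =====
-- def pour(cipher: str):
--     # Per-column height map: heights[c] = number of grains settled in column c.
--     # Columns are gap-free from the floor (row 0) up, so cell (r, c) is occupied
--     # iff 1 - heights[c] <= r <= 0; a grain dropped on column c comes to rest on
--     # row -heights[c].  Rolling left (then right) is possible exactly when that
--     # neighbour column is strictly lower.
--     heights = {}
--     result = {}
--     for ch in cipher:
--         c = 0
--         while True:
--             hc = heights.get(c, 0)
--             if hc == 0: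
--                 break
--             if heights.get(c - 1, 0) < hc:
--                 c -= 1
--                 continue
--             if heights.get(c + 1, 0) < hc:
--                 c += 1
--                 continue
--             break
--         hc = heights.get(c, 0)
--         result[(-hc, c)] = ch
--         heights[c] = hc + 1
--     return "".join(result[pos] for pos in sorted(result))
-- ===== Notes on version B (the rewrite author's own statement) =====
-- stated objective: faster
-- what changed: Replaces A's cell-by-cell fall simulation over an occupancy dict (stepping the grain row by row from above the pile and probing cells) by a per-column height map: a grain's landing column is found by walking columns (roll left/right while the neighbour column is strictly lower), its rest row is -height[c] directly, using the gap-free-columns invariant; the settled chars are recorded and emitted identically.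
import Mathlib
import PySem

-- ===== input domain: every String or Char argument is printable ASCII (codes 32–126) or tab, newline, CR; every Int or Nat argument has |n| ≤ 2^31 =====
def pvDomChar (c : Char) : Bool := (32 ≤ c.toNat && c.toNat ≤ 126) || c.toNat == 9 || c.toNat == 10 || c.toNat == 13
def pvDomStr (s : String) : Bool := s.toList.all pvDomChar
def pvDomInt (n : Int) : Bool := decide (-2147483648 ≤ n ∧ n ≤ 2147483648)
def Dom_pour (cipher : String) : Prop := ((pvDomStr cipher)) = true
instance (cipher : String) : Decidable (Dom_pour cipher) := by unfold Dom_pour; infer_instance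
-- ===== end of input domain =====

-- B replaces A's cell-by-cell fall simulation by a per-column height map with O(1)
-- occupancy tests and top-of-column jumps (objective: faster, constant factor).

-- ===== PORT A =====
-- "".join(result[pos] for pos in sorted(result)) — identical final line in A and in B
def pourRender (res : PySem.Dict (Int × Int) Char) : String :=
  String.ofList ((PySem.List.sorted2 res.keys (fun p => p.1) (fun p => p.2)).map
    (fun pos => res.getD pos ' '))

-- A's inner `while True` fall loop from cell (r, c): floor, down, left, right, settle.
-- Python tests `r == 0`; on every state this loop reaches r ≤ 0 holds (r starts
-- below 0 and only steps up by 1, breaking at 0), so the guard `0 ≤ r` is the same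
-- test there and provides the termination measure.  The always-true `assert` is a no-op.
def pourFall (res : PySem.Dict (Int × Int) Char) (r c : Int) : Int × Int :=
  if 0 ≤ r then (r, c)
  else if res.contains (r + 1, c) = false then pourFall res (r + 1) c
  else if res.contains (r + 1, c - 1) = false then pourFall res (r + 1) (c - 1)
  else if res.contains (r + 1, c + 1) = false then pourFall res (r + 1) (c + 1)
  else (r, c)
termination_by (-r).toNat
decreasing_by all_goals omega

def pour (cipher : String) : String :=
  pourRender (cipher.toList.foldl
    (fun (st : Int × PySem.Dict (Int × Int) Char) ch =>
      let rc := pourFall st.2 (st.1 - 1) 0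
      (min st.1 rc.1, st.2.insert rc ch))
    (0, PySem.Dict.empty)).2

-- ===== PORT B =====
-- B's `while True` roll loop over COLUMNS: heights[c] = 0 → floor; lower left
-- neighbour → roll left; lower right neighbour → roll right; else settle.
-- Heights are counts (Python ints that are always ≥ 0), kept as Nat.
def pourRoll (heights : PySem.Dict Int Nat) (c : Int) : Int :=
  if heights.getD c 0 = 0 then c
  else if heights.getD (c - 1) 0 < heights.getD c 0 then pourRoll heights (c - 1)
  else if heights.getD (c + 1) 0 < heights.getD c 0 then pourRoll heights (c + 1)
  else c
termination_by heights.getD c 0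
decreasing_by all_goals assumption

def pour_alt (cipher : String) : String :=
  pourRender (cipher.toList.foldl
    (fun (st : PySem.Dict Int Nat × PySem.Dict (Int × Int) Char) ch =>
      let c := pourRoll st.1 0
      let hc := st.1.getD c 0
      (st.1.insert c (hc + 1), st.2.insert (-(hc : Int), c) ch))
    (PySem.Dict.empty, PySem.Dict.empty)).2

-- ===== PRECONDITION & SPEC =====
def Spec_pour (cipher : String) (out : String) : Prop := out = pour_alt cipher
instance (cipher : String) (out : String) : Decidable (Spec_pour cipher out) := by unfold Spec_pour; infer_instance

-- ===== CLAIM (what is proved, stated in full; the proofs are below) =====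
def Claim_equal_pour : Prop := ∀ (cipher : String), Dom_pour cipher → Spec_pour cipher (pour cipher)

-- ===== LEMMAS AND PROOFS =====

-- Occupancy invariant: A's dict holds cell (r, c) iff column c is at least -r+1 high
-- (columns are gap-free from the floor row 0 upwards).
def PourOcc (res : PySem.Dict (Int × Int) Char) (hs : PySem.Dict Int Nat) : Prop :=
  ∀ r c : Int, res.contains (r, c) = true ↔ (1 - (hs.getD c 0 : Int) ≤ r ∧ r ≤ 0)

-- A grain released at (r, c) at or above the top of column c lands where B's roll walk says.
theorem pourFall_eq_roll (res : PySem.Dict (Int × Int) Char) (hs : PySem.Dict Int Nat)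
    (hocc : PourOcc res hs) (r c : Int)
    (hr : r ≤ -(hs.getD c 0 : Int)) (hr0 : r ≤ 0) :
    pourFall res r c = (-(hs.getD (pourRoll hs c) 0 : Int), pourRoll hs c) := by
  rw [pourFall]
  by_cases h0 : 0 ≤ r
  · have hre : r = 0 := le_antisymm hr0 h0
    have hc0 : hs.getD c 0 = 0 := by omega
    have hroll : pourRoll hs c = c := by rw [pourRoll]; simp [hc0]
    rw [if_pos h0, hroll]
    simp [hc0, hre]
  · have hdown := hocc (r + 1) c
    by_cases hlt : r < -(hs.getD c 0 : Int)
    · -- still falling in column c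
      have hdf : res.contains (r + 1, c) = false := by
        cases hb : res.contains (r + 1, c) with
        | false => rfl
        | true => exact absurd (hdown.mp hb) (by omega)
      rw [if_neg h0, if_pos hdf]
      exact pourFall_eq_roll res hs hocc (r + 1) c (by omega) (by omega)
    · -- r = -h c : down blocked
      have hre : r = -(hs.getD c 0 : Int) := by omega
      have hcpos : hs.getD c 0 ≠ 0 := by omega
      have hdt : res.contains (r + 1, c) = true := hdown.mpr (by omega)
      have hleft := hocc (r + 1) (c - 1)
      by_cases hl : hs.getD (c - 1) 0 < hs.getD c 0
      · have hlf : res.contains (r + 1, c - 1) = false := by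
          cases hb : res.contains (r + 1, c - 1) with
          | false => rfl
          | true =>
            have h1 := (hleft.mp hb).1
            have h2 : (hs.getD (c - 1) 0 : Int) < (hs.getD c 0 : Int) := by exact_mod_cast hl
            omega
        have hroll : pourRoll hs c = pourRoll hs (c - 1) := by
          rw [pourRoll]; simp [hcpos, hl]
        rw [if_neg h0, if_neg (by simp [hdt]), if_pos hlf, hroll]
        have h2 : (hs.getD (c - 1) 0 : Int) < (hs.getD c 0 : Int) := by exact_mod_cast hl
        exact pourFall_eq_roll res hs hocc (r + 1) (c - 1) (by omega) (by omega)
      · have h2 : (hs.getD c 0 : Int) ≤ (hs.getD (c - 1) 0 : Int) := by exact_mod_cast not_lt.mp hl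
        have hlt' : res.contains (r + 1, c - 1) = true := hleft.mpr (by omega)
        have hright := hocc (r + 1) (c + 1)
        by_cases hrgt : hs.getD (c + 1) 0 < hs.getD c 0
        · have hrf : res.contains (r + 1, c + 1) = false := by
            cases hb : res.contains (r + 1, c + 1) with
            | false => rfl
            | true =>
              have h1 := (hright.mp hb).1
              have h3 : (hs.getD (c + 1) 0 : Int) < (hs.getD c 0 : Int) := by exact_mod_cast hrgt
              omega
          have hroll : pourRoll hs c = pourRoll hs (c + 1) := by
            rw [pourRoll]; simp [hcpos, hl, hrgt]
          rw [if_neg h0, if_neg (by simp [hdt]), if_neg (by simp [hlt']), if_pos hrf, hroll]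
          have h3 : (hs.getD (c + 1) 0 : Int) < (hs.getD c 0 : Int) := by exact_mod_cast hrgt
          exact pourFall_eq_roll res hs hocc (r + 1) (c + 1) (by omega) (by omega)
        · have h3 : (hs.getD c 0 : Int) ≤ (hs.getD (c + 1) 0 : Int) := by exact_mod_cast not_lt.mp hrgt
          have hrt : res.contains (r + 1, c + 1) = true := hright.mpr (by omega)
          have hroll : pourRoll hs c = c := by
            rw [pourRoll]; simp [hcpos, hl, hrgt]
          rw [if_neg h0, if_neg (by simp [hdt]), if_neg (by simp [hlt']),
            if_neg (by simp [hrt]), hroll, hre]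
termination_by (hs.getD c 0, (-r).toNat)
decreasing_by
  · exact Prod.Lex.right _ (by omega)
  · exact Prod.Lex.left _ _ (by assumption)
  · exact Prod.Lex.left _ _ (by assumption)

theorem pour_fold_eq (l : List Char) :
    ∀ (highest : Int) (hs : PySem.Dict Int Nat) (res : PySem.Dict (Int × Int) Char),
    highest ≤ 0 → (∀ c : Int, highest ≤ 1 - (hs.getD c 0 : Int)) → PourOcc res hs →
    (l.foldl (fun (st : Int × PySem.Dict (Int × Int) Char) ch =>
        let rc := pourFall st.2 (st.1 - 1) 0
        (min st.1 rc.1, st.2.insert rc ch)) (highest, res)).2 =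
    (l.foldl (fun (st : PySem.Dict Int Nat × PySem.Dict (Int × Int) Char) ch =>
        let c := pourRoll st.1 0
        let hc := st.1.getD c 0
        (st.1.insert c (hc + 1), st.2.insert (-(hc : Int), c) ch)) (hs, res)).2 := by
  induction l with
  | nil => intro highest hs res _ _ _; rfl
  | cons ch l ih =>
    intro highest hs res hg hHi hocc
    simp only [List.foldl_cons]
    have h0le : highest - 1 ≤ -(hs.getD 0 0 : Int) := by have := hHi 0; omega
    have hfall := pourFall_eq_roll res hs hocc (highest - 1) 0 h0le (by omega)
    rw [hfall]
    exact ih (min highest (-(hs.getD (pourRoll hs 0) 0 : Int)))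
      ((hs.insert (pourRoll hs 0) (hs.getD (pourRoll hs 0) 0 + 1)))
      (res.insert (-(hs.getD (pourRoll hs 0) 0 : Int), pourRoll hs 0) ch)
      (le_trans (min_le_left _ _) hg)
      (by
        intro c
        rw [PySem.Dict.getD_insert]
        by_cases hcc : c = pourRoll hs 0
        · rw [if_pos hcc, min_le_iff]
          right
          omega
        · rw [if_neg hcc, min_le_iff]
          exact Or.inl (hHi c))
      (by
        intro r c
        have hold := hocc r c
        rw [PySem.Dict.contains_insert, PySem.Dict.getD_insert]
        by_cases hcc : c = pourRoll hs 0
        · subst hcc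
          rw [if_pos rfl]
          simp only [Bool.or_eq_true, beq_iff_eq, Prod.mk.injEq]
          rw [hold]
          simp only [and_true]
          omega
        · rw [if_neg hcc]
          simp only [Bool.or_eq_true, beq_iff_eq, Prod.mk.injEq]
          rw [hold]
          exact ⟨fun h => h.resolve_left (fun h2 => hcc h2.2), Or.inr⟩)

theorem pour_spec : Claim_equal_pour := by
  intro cipher _
  unfold Spec_pour pour pour_alt
  rw [pour_fold_eq cipher.toList 0 PySem.Dict.empty PySem.Dict.empty (le_refl 0)
    (by intro c; simp [PySem.Dict.getD_empty])
    (by intro r c; simp [PySem.Dict.contains_empty, PySem.Dict.getD_empty]; omega)]
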